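-- pv_equiv track=rewrite | github.com/AlanKolmakov/HomeWork_Python | py/part6/HomeWork_56.py | seq_search
-- ===== SOURCE A (Python) =====
-- def seq_search(lst, target):
--     lst.sort()
--     pos = 0
--     if lst[-1] < target:
--         return False
--     while pos < len(lst):
--         if lst[pos] == target:
--             return True
--         if lst[pos] > target:
--             return False
--         pos += 1
-- ===== SOURCE B (Python) =====
-- def seq_search(lst, target):
--     lst.sort()
--     lo, hi = 0, len(lst)
--     while lo < hi:
--         mid = (lo + hi) // 2
--         if lst[mid] < target:
--             lo = mid + 1
--         else:
--             hi = mid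
--     return lo < len(lst) and lst[lo] == target
-- ===== Notes on version B (the rewrite author's own statement) =====
-- stated objective: alternative
-- what changed: After the same in-place sort, the short-circuiting forward scan (with a last-element guard) is replaced by a hand-written binary search for the leftmost position >= target; the sort still dominates, so no overall speed is claimed.
-- crash fix: On an empty list A raises IndexError at lst[-1]; B's binary search degenerates and returns False. — e.g. on seq_search([], 0): A raises IndexError, B returns false
import Mathlib
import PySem

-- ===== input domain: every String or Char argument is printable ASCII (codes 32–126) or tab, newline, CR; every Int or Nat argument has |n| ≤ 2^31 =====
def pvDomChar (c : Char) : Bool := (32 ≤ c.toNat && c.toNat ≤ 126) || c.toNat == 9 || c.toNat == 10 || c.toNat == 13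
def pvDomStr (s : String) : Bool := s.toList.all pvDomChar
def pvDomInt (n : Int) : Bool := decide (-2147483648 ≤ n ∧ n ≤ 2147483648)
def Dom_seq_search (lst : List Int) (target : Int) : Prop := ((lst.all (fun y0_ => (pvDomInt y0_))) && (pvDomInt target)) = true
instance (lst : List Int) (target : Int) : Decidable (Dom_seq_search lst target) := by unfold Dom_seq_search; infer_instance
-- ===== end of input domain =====

-- B replaces A's post-sort forward scan by a binary search; same in-place sort (both mutate lst); return values proved equal on nonempty lists.


-- ===== PORT A =====
-- the while-loop over pos, as structural recursion on the sorted list's tail;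
-- [] = loop exhausted (Python would return None; unreachable when the lst[-1] guard passed)
def seqLoopA : List Int → Int → Bool
  | [], _ => false
  | x :: rest, target =>
    if x = target then true
    else if x > target then false
    else seqLoopA rest target

def seq_search (lst : List Int) (target : Int) : Bool :=
  let s := PySem.List.sorted lst (fun x => x) false
  match PySem.List.pyGet? s (-1) with      -- lst[-1]; none = IndexError, excluded by Pre_
  | none => false
  | some last => if last < target then false else seqLoopA s target

-- ===== PORT B =====
-- binary search for the leftmost index with s[mid] ≥ target; lo, hi, mid are in-range
-- Nat indices, so List.getD is exact for lst[mid], and (lo+hi)/2 on Nat is Python's //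
def bsearchB (s : List Int) (target : Int) (lo hi : Nat) : Nat :=
  if _h : lo < hi then
    let mid := (lo + hi) / 2
    if s.getD mid 0 < target then bsearchB s target (mid + 1) hi
    else bsearchB s target lo mid
  else lo
termination_by hi - lo

def seq_search_alt (lst : List Int) (target : Int) : Bool :=
  let s := PySem.List.sorted lst (fun x => x) false
  let i := bsearchB s target 0 s.length
  decide (i < s.length) && decide (s.getD i 0 = target)

-- ===== PRECONDITION & SPEC =====
-- Pre_ excludes only the empty list, where A's 'lst[-1]' raises IndexError.
def Pre_seq_search (lst : List Int) (target : Int) : Prop := lst ≠ []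
instance (lst : List Int) (target : Int) : Decidable (Pre_seq_search lst target) := by unfold Pre_seq_search; infer_instance
def pvWitness_seq_search : List Int × Int := ([3, 1, 2], 2)

-- On the empty list A raises IndexError at lst[-1]; B's binary search degenerates and returns False.
def Raises_seq_search (lst : List Int) (target : Int) : Prop := lst = []
instance (lst : List Int) (target : Int) : Decidable (Raises_seq_search lst target) := by unfold Raises_seq_search; infer_instance
def pvRaiseWitness_seq_search : List Int × Int := ([], 0)
def pvRaiseWitnessOut_seq_search : Bool := false

def Spec_seq_search (lst : List Int) (target : Int) (out : Bool) : Prop := out = seq_search_alt lst target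
instance (lst : List Int) (target : Int) (out : Bool) : Decidable (Spec_seq_search lst target out) := by unfold Spec_seq_search; infer_instance

-- ===== CLAIM (what is proved, stated in full; the proofs are below) =====
def Claim_equal_seq_search : Prop := ∀ (lst : List Int) (target : Int), Dom_seq_search lst target → Pre_seq_search lst target → Spec_seq_search lst target (seq_search lst target)
def Claim_raises_seq_search : Prop := (∀ (lst : List Int) (target : Int), Dom_seq_search lst target → Raises_seq_search lst target → ¬ Pre_seq_search lst target) ∧ (Dom_seq_search (pvRaiseWitness_seq_search.1) (pvRaiseWitness_seq_search.2) ∧ Raises_seq_search (pvRaiseWitness_seq_search.1) (pvRaiseWitness_seq_search.2) ∧ seq_search_alt (pvRaiseWitness_seq_search.1) (pvRaiseWitness_seq_search.2) = pvRaiseWitnessOut_seq_search)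

-- ===== LEMMAS AND PROOFS =====

-- monotone access on a ≤-pairwise list
lemma getD_mono_of_pairwise (s : List Int) (hs : s.Pairwise (· ≤ ·)) {p q : Nat}
    (hpq : p ≤ q) (hq : q < s.length) : s.getD p 0 ≤ s.getD q 0 := by
  rcases eq_or_lt_of_le hpq with rfl | hlt
  · exact le_refl _
  · have := (List.pairwise_iff_getElem.mp hs) p q (lt_of_le_of_lt hpq hq) hq hlt
    simpa [List.getD_eq_getElem, lt_of_le_of_lt hpq hq, hq] using this

-- A's scan on a sorted list decides membership
lemma seqLoopA_eq (s : List Int) (t : Int) (hs : s.Pairwise (· ≤ ·)) :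
    seqLoopA s t = decide (t ∈ s) := by
  induction s with
  | nil => simp [seqLoopA]
  | cons x rest ih =>
    have hx : ∀ y ∈ rest, x ≤ y := (List.pairwise_cons.mp hs).1
    have hrest := (List.pairwise_cons.mp hs).2
    by_cases hxt : x = t
    · simp [seqLoopA, hxt]
    · by_cases hgt : x > t
      · have : t ∉ x :: rest := by
          intro hm
          rcases List.mem_cons.mp hm with rfl | hm
          · exact lt_irrefl t hgt
          · exact absurd (hx t hm) (not_le.mpr hgt)
        simp [seqLoopA, hxt, hgt, this]
      · have : (t ∈ x :: rest) ↔ (t ∈ rest) := by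
          constructor
          · intro hm; rcases List.mem_cons.mp hm with rfl | hm
            · exact absurd rfl hxt
            · exact hm
          · exact fun hm => List.mem_cons_of_mem _ hm
        simp [seqLoopA, hxt, hgt, ih hrest, this]

-- binary-search invariant
lemma bsearchB_inv (s : List Int) (t : Int) (hs : s.Pairwise (· ≤ ·)) :
    ∀ lo hi, lo ≤ hi → hi ≤ s.length →
    (∀ j, j < lo → s.getD j 0 < t) →
    (∀ j, hi ≤ j → j < s.length → t ≤ s.getD j 0) →
    (∀ j, j < bsearchB s t lo hi → s.getD j 0 < t) ∧
    (∀ j, bsearchB s t lo hi ≤ j → j < s.length → t ≤ s.getD j 0) ∧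
    bsearchB s t lo hi ≤ s.length := by
  intro lo hi
  induction hlh : hi - lo using Nat.strong_induction_on generalizing lo hi with
  | _ n ih =>
  intro hle hhi hlo' hhi'
  by_cases h : lo < hi
  · have hmid : (lo + hi) / 2 < hi := by omega
    have hmidlo : lo ≤ (lo + hi) / 2 := by omega
    rw [bsearchB]
    simp only [h, dif_pos]
    by_cases hc : s.getD ((lo + hi) / 2) 0 < t
    · simp only [hc, if_pos]
      refine ih (hi - ((lo + hi) / 2 + 1)) (by omega) _ _ rfl (by omega) hhi ?_ hhi'
      intro j hj
      exact lt_of_le_of_lt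
        (getD_mono_of_pairwise s hs (by omega) (by omega)) hc
    · simp only [hc, if_false]
      refine ih (((lo + hi) / 2) - lo) (by omega) _ _ rfl (by omega) (by omega) hlo' ?_
      intro j hj1 hj2
      exact le_trans (not_lt.mp hc) (getD_mono_of_pairwise s hs hj1 hj2)
  · rw [bsearchB]
    simp only [h, dif_neg, not_false_iff]
    have : lo = hi := by omega
    exact ⟨hlo', fun j hj1 hj2 => hhi' j (this ▸ hj1) hj2, by omega⟩

-- B decides membership on a sorted list
lemma seq_search_alt_eq (lst : List Int) (t : Int) :
    seq_search_alt lst t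
      = decide (t ∈ PySem.List.sorted lst (fun x => x) false) := by
  set s := PySem.List.sorted lst (fun x => x) false with hsdef
  have hs : s.Pairwise (· ≤ ·) := by
    simpa using PySem.List.sorted_pairwise lst (fun x => x)
  obtain ⟨hlt, hge, hlen⟩ :=
    bsearchB_inv s t hs 0 s.length (Nat.zero_le _) (le_refl _)
      (by intro j hj; omega) (by intro j hj1 hj2; omega)
  set i := bsearchB s t 0 s.length with hidef
  show (decide (i < s.length) && decide (s.getD i 0 = t)) = decide (t ∈ s)
  by_cases h1 : i < s.length
  · by_cases h2 : s.getD i 0 = t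
    · have : t ∈ s := by
        rw [← h2, List.getD_eq_getElem s 0 h1]
        exact List.getElem_mem h1
      have h2' : s[i] = t := by rw [← List.getD_eq_getElem s 0 h1]; exact h2
      simp [h1, h2', this]
    · have : t ∉ s := by
        intro hm
        obtain ⟨j, hj, hjeq⟩ := List.mem_iff_getElem.mp hm
        have hjd : s.getD j 0 = t := by rw [List.getD_eq_getElem s 0 hj]; exact hjeq
        by_cases hji : j < i
        · exact absurd hjd (ne_of_lt (hlt j hji))
        · have h3 : t ≤ s.getD i 0 := hge i (le_refl _) h1
          have h4 : s.getD i 0 ≤ s.getD j 0 := getD_mono_of_pairwise s hs (by omega) hj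
          exact h2 (le_antisymm (hjd ▸ h4) h3)
      have h2' : ¬ s[i] = t := by rw [← List.getD_eq_getElem s 0 h1]; exact h2
      simp [h1, h2', this]
  · have : t ∉ s := by
      intro hm
      obtain ⟨j, hj, hjeq⟩ := List.mem_iff_getElem.mp hm
      have hjd : s.getD j 0 < t := hlt j (by omega)
      rw [List.getD_eq_getElem s 0 hj] at hjd
      exact lt_irrefl t (hjeq ▸ hjd)
    simp [h1, this]

-- on a ≤-pairwise list everything is ≤ the last element
lemma notMem_of_getLast_lt (s : List Int) (hs : s.Pairwise (· ≤ ·)) (hne : s ≠ []) (t : Int)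
    (h : s.getLast hne < t) : t ∉ s := by
  intro hm
  obtain ⟨j, hj, hjeq⟩ := List.mem_iff_getElem.mp hm
  have hlast : s.getLast hne = s.getD (s.length - 1) 0 := by
    rw [List.getD_eq_getElem s 0 (by omega), List.getLast_eq_getElem]
  have hmono := getD_mono_of_pairwise s hs (p := j) (q := s.length - 1) (by omega) (by omega)
  rw [List.getD_eq_getElem s 0 hj, hjeq, ← hlast] at hmono
  exact absurd h (not_lt.mpr hmono)

-- ===== VERDICT (by name: the statement is the Claim_ definition above) =====
theorem seq_search_spec : Claim_equal_seq_search := by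
  intro lst target _ hpre
  have hs : (PySem.List.sorted lst (fun x => x) false).Pairwise (· ≤ ·) := by
    simpa using PySem.List.sorted_pairwise lst (fun x => x)
  have hne : PySem.List.sorted lst (fun x => x) false ≠ [] := by
    intro h
    exact hpre ((PySem.List.sorted_eq_nil_iff _ _ _).mp h)
  unfold Spec_seq_search
  rw [seq_search_alt_eq lst target]
  simp only [seq_search]
  rw [PySem.List.pyGet?_neg_one]
  rw [List.getLast?_eq_some_getLast hne]
  by_cases hguard : (PySem.List.sorted lst (fun x => x) false).getLast hne < target
  · have hnm := notMem_of_getLast_lt _ hs hne target hguard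
    simp [hguard, hnm]
  · simp [hguard, seqLoopA_eq _ target hs]

@[simp] theorem seq_search_raises : Claim_raises_seq_search := by
  unfold Claim_raises_seq_search
  exact ⟨fun lst target _ h => by simp [Pre_seq_search, Raises_seq_search] at h ⊢; exact h, by decide⟩
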